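-- pv_equiv track=rewrite | github.com/DaniyilYolkin/OP | Lab7_13/Lab7_13.py | f_generator
-- ===== SOURCE A (Python) =====
-- def f_generator(arrayOfIntegers, multiplier):
--     F = []
--     counter = -1
--     for number in arrayOfIntegers:
--         counter += 1
--         if counter % 2 == 0 and counter != 0:
--             F.append(number*multiplier)
--         else:
--             F.append(number)
--     return F
-- ===== SOURCE B (Python) =====
-- def f_generator(arrayOfIntegers, multiplier):
--     F = list(arrayOfIntegers)
--     F[2::2] = [x * multiplier for x in F[2::2]]
--     return F
-- ===== Notes on version B (the rewrite author's own statement) =====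
-- stated objective: idiomatic
-- what changed: B copies the list and rewrites the even indices from 2 in one bulk strided slice assignment instead of walking the list with a counter and a per-element parity branch.
import Mathlib
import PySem

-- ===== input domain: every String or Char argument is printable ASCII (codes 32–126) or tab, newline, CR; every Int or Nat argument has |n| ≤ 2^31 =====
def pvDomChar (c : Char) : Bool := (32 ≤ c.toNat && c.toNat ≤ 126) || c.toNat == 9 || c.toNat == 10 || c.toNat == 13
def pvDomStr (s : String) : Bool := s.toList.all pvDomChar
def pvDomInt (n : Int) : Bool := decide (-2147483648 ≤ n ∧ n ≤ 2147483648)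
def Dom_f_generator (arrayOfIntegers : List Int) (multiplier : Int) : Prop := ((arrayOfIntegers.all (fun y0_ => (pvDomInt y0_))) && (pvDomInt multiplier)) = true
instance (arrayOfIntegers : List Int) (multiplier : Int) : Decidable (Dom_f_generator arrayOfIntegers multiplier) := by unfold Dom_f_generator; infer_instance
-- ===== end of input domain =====

-- B rewrites the even indices from 2 via a copy plus one strided slice assignment,
-- replacing A's counter-and-parity-branch loop (objective: idiomatic).


-- ===== PORT A =====
-- the for-loop over arrayOfIntegers with state (F, counter), transcribed as structural recursion
def f_generator_go (multiplier : Int) (F : List Int) (counter : Int) : List Int → List Int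
  | [] => F
  | number :: rest =>
    let c := counter + 1
    let F' := if PySem.Int.mod c 2 = 0 ∧ c ≠ 0 then F ++ [number * multiplier] else F ++ [number]
    f_generator_go multiplier F' c rest

def f_generator (arrayOfIntegers : List Int) (multiplier : Int) : List Int :=
  f_generator_go multiplier [] (-1) arrayOfIntegers

-- ===== PORT B =====
-- F[2::2] read: every second element of the suffix starting at index 2
def every2 : List Int → List Int
  | [] => []
  | [a] => [a]
  | a :: _ :: r => a :: every2 r

-- strided slice assignment: write vals at indices 0,2,4,… of xs
def putEvery2 : List Int → List Int → List Int
  | xs, [] => xs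
  | [], _ :: _ => []
  | [_], v :: _ => [v]
  | _ :: y :: rest, v :: vs => v :: y :: putEvery2 rest vs

-- F = list(xs); F[2::2] = [x*multiplier for x in F[2::2]]; return F
def f_generator_alt (arrayOfIntegers : List Int) (multiplier : Int) : List Int :=
  match arrayOfIntegers with
  | a :: b :: rest => a :: b :: putEvery2 rest ((every2 rest).map (· * multiplier))
  | short => short

-- ===== PRECONDITION & SPEC =====
def Spec_f_generator (arrayOfIntegers : List Int) (multiplier : Int) (out : List Int) : Prop := out = f_generator_alt arrayOfIntegers multiplier
instance (arrayOfIntegers : List Int) (multiplier : Int) (out : List Int) : Decidable (Spec_f_generator arrayOfIntegers multiplier out) := by unfold Spec_f_generator; infer_instance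

-- ===== CLAIM (what is proved, stated in full; the proofs are below) =====
def Claim_equal_f_generator : Prop := ∀ (arrayOfIntegers : List Int) (multiplier : Int), Dom_f_generator arrayOfIntegers multiplier → Spec_f_generator arrayOfIntegers multiplier (f_generator arrayOfIntegers multiplier)

-- ===== LEMMAS AND PROOFS =====

-- alternating map: multiply the current element iff the flag is set, flipping each step
def mix (mult : Bool) (m : Int) : List Int → List Int
  | [] => []
  | x :: r => (if mult then x * m else x) :: mix (!mult) m r

theorem go_eq_mix (m : Int) (rest : List Int) : ∀ (F : List Int) (c : Int), 0 < c →
    f_generator_go m F c rest = F ++ mix (decide ((c + 1) % 2 = 0)) m rest := by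
  induction rest with
  | nil => intro F c _; simp [f_generator_go, mix]
  | cons x r ih =>
    intro F c hc
    have hc' : 0 < c + 1 := by omega
    have hmod : PySem.Int.mod (c + 1) 2 = (c + 1) % 2 :=
      PySem.Int.mod_eq_emod_of_pos (by norm_num)
    rw [f_generator_go]
    simp only [hmod]
    by_cases h : (c + 1) % 2 = 0
    · have hne : c + 1 ≠ 0 := by omega
      have h2 : (c + 1 + 1) % 2 = 1 := by omega
      rw [if_pos ⟨h, hne⟩, ih _ (c + 1) hc']
      simp [mix, h, h2]
    · have h2 : (c + 1) % 2 = 1 := by omega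
      have h3 : (c + 1 + 1) % 2 = 0 := by omega
      rw [if_neg (by tauto), ih _ (c + 1) hc']
      simp [mix, h, h3]

theorem mix_true_eq_put (m : Int) (rest : List Int) :
    mix true m rest = putEvery2 rest ((every2 rest).map (· * m)) := by
  induction rest using every2.induct with
  | case1 => simp [mix, every2, putEvery2]
  | case2 a => simp [mix, every2, putEvery2]
  | case3 a b r ih => simp [mix, every2, putEvery2, ih]

-- ===== VERDICT (by name: the statement is the Claim_ definition above) =====
theorem f_generator_spec : Claim_equal_f_generator := by
  intro xs m _
  unfold Spec_f_generator
  cases xs with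
  | nil => rfl
  | cons a t =>
    cases t with
    | nil =>
      simp [f_generator, f_generator_go, f_generator_alt]
    | cons b rest =>
      show f_generator_go m [] (-1) (a :: b :: rest) = _
      rw [f_generator_go, f_generator_go]
      norm_num [PySem.Int.mod]
      rw [if_neg (by decide : ¬ (Int.fmod (1 : Int) 2 = 0))]
      rw [go_eq_mix m rest [a, b] 1 (by omega)]
      norm_num [f_generator_alt, mix_true_eq_put]
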